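-- pv_equiv track=rewrite | github.com/Muhammad-Hashir-55/Leetcode-Problem-Solving-and-Solutions | Generate_a_String_With_Characters_That_Have_Odd_Counts.py | generateTheString
-- ===== SOURCE A (Python) =====
-- def generateTheString(n: int) -> str:
--     if(n%2!=0):
--         new_string = ""
--         for i in range(n):
--             new_string = new_string + 'a'
--         return new_string
--     else:
--         new_string = ""
--         for i in range(n-1):
--             new_string = new_string + 'a'
--         new_string = new_string +'b'
--         return new_string
-- ===== SOURCE B (Python) =====
-- def generateTheString(n: int) -> str:
--     # closed form: odd n -> 'a'*n; even n -> 'a'*(n-1) + 'b'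
--     return 'a' * n if n % 2 else 'a' * (n - 1) + 'b'
-- ===== Notes on version B (the rewrite author's own statement) =====
-- stated objective: simpler
-- what changed: Replaced both character-accumulation loops with a single closed-form expression using string repetition ('a'*n or 'a'*(n-1)+'b'), no iteration at all.
import Mathlib
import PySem

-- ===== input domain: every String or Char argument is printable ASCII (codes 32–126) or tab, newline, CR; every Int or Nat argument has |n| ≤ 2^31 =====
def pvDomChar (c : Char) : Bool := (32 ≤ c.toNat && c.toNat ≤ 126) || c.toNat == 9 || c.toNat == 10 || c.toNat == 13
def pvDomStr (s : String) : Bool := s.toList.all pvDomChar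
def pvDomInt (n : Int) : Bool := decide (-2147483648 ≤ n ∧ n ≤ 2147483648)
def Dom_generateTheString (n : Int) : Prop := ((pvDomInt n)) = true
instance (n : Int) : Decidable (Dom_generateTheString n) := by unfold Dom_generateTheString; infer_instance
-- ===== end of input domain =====

-- B replaces A's two accumulation loops with a closed-form string expression (simpler).
-- ===== PORT A =====
def generateTheString (n : Int) : String :=
  if PySem.Int.mod n 2 != 0 then
    String.mk ((PySem.List.pyRange 0 n 1).foldl (fun s _ => s ++ ['a']) [])
  else
    String.mk (((PySem.List.pyRange 0 (n - 1) 1).foldl (fun s _ => s ++ ['a']) []) ++ ['b'])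

-- ===== PORT B =====
def generateTheString_alt (n : Int) : String :=
  if PySem.Int.mod n 2 != 0 then
    String.mk (List.replicate n.toNat 'a')
  else
    String.mk (List.replicate (n - 1).toNat 'a' ++ ['b'])

-- ===== PRECONDITION & SPEC =====
def Spec_generateTheString (n : Int) (out : String) : Prop := out = generateTheString_alt n
instance (n : Int) (out : String) : Decidable (Spec_generateTheString n out) := by unfold Spec_generateTheString; infer_instance

-- ===== CLAIM (what is proved, stated in full; the proofs are below) =====
def Claim_equal_generateTheString : Prop := ∀ (n : Int), Dom_generateTheString n → Spec_generateTheString n (generateTheString n)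

-- ===== LEMMAS AND PROOFS =====
theorem foldl_const_append_a (l : List Int) (init : List Char) :
    l.foldl (fun s _ => s ++ ['a']) init = init ++ List.replicate l.length 'a' := by
  induction l generalizing init with
  | nil => simp
  | cons x xs ih => simp [List.foldl_cons, ih, List.replicate_succ]

theorem foldl_range_replicate (m : Int) :
    (PySem.List.pyRange 0 m 1).foldl (fun s _ => s ++ ['a']) [] = List.replicate m.toNat 'a' := by
  rw [foldl_const_append_a]
  simp [PySem.List.length_pyRange_one]

-- ===== VERDICT (by name: the statement is the Claim_ definition above) =====
theorem generateTheString_spec : Claim_equal_generateTheString := by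
  intro n _
  unfold Spec_generateTheString generateTheString generateTheString_alt
  split <;> rw [foldl_range_replicate]
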